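-- pv_equiv track=rewrite | github.com/fresh-minds/FreshDataPlatform | src/ingestion/source_sp1/parse_vacatures.py | _is_vacature_dict
-- ===== SOURCE A (Python) =====
-- def _is_vacature_dict(d: dict) -> bool:
--     """Heuristic: does this dict look like a single vacancy record?"""
--     keys_lower = {k.lower().replace("__c", "").replace("_", "") for k in d}
--     score = sum([
--         bool(keys_lower & {"id", "vacatureid", "jobid", "requisitionid", "externalid"}),
--         bool(keys_lower & {"title", "functietitel", "name", "jobtitle", "vacaturetitel"}),
--         bool(keys_lower & {"status", "staat"}),
--         bool(keys_lower & {"location", "locatie", "city", "stad"}),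
--         bool(keys_lower & {"description", "omschrijving", "jobdescription"}),
--     ])
--     return score >= 2
-- ===== SOURCE B (Python) =====
-- _CATEGORY_OF = {}
-- for _i, _kws in enumerate([
--     ("id", "vacatureid", "jobid", "requisitionid", "externalid"),
--     ("title", "functietitel", "name", "jobtitle", "vacaturetitel"),
--     ("status", "staat"),
--     ("location", "locatie", "city", "stad"),
--     ("description", "omschrijving", "jobdescription"),
-- ]):
--     for _kw in _kws:
--         _CATEGORY_OF[_kw] = _i
--
--
-- def _is_vacature_dict(d: dict) -> bool:
--     """Heuristic: does this dict look like a single vacancy record?"""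
--     found = set()
--     for k in d:
--         i = _CATEGORY_OF.get(k.lower().replace("__c", "").replace("_", ""))
--         if i is not None:
--             found.add(i)
--     return len(found) >= 2
-- ===== Notes on version B (the rewrite author's own statement) =====
-- stated objective: alternative
-- what changed: Replaces the build-a-normalized-key-set plus five set-intersection tests with a module-level reverse lookup dict keyword->category and a single pass over the keys collecting distinct category indices, returning len(found) >= 2.
import Mathlib
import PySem

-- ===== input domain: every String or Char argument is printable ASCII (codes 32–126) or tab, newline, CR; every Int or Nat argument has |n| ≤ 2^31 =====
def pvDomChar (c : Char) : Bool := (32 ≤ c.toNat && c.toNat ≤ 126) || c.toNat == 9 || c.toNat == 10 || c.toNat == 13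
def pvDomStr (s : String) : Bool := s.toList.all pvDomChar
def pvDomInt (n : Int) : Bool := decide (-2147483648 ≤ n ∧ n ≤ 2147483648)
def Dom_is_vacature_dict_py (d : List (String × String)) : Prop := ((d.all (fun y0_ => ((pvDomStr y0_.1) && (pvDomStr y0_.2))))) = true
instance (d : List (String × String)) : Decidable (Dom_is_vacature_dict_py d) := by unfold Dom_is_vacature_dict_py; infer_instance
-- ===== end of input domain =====

-- B replaces the normalized-key-set plus five set-intersection tests by a reverse keyword->category
-- lookup table and a single pass collecting distinct category indices (objective: alternative).

-- shared normalization k.lower().replace("__c","").replace("_","") (same expression in both Pythons)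
def pvNormKey (k : String) : String :=
  PySem.Str.replace (PySem.Str.replace (PySem.Str.lower k) "__c" "") "_" ""

-- ===== PORT A =====
def is_vacature_dict_py (d : List (String × String)) : Bool :=
  let keys_lower : PySem.Set String := PySem.Set.ofList (d.map (fun kv => pvNormKey kv.1))
  let score : Int :=
    ((!(PySem.Set.inter keys_lower ["id", "vacatureid", "jobid", "requisitionid", "externalid"]).isEmpty).toNat : Int)
    + ((!(PySem.Set.inter keys_lower ["title", "functietitel", "name", "jobtitle", "vacaturetitel"]).isEmpty).toNat : Int)
    + ((!(PySem.Set.inter keys_lower ["status", "staat"]).isEmpty).toNat : Int)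
    + ((!(PySem.Set.inter keys_lower ["location", "locatie", "city", "stad"]).isEmpty).toNat : Int)
    + ((!(PySem.Set.inter keys_lower ["description", "omschrijving", "jobdescription"]).isEmpty).toNat : Int)
  decide (score ≥ 2)

-- ===== PORT B =====
-- the module-level reverse lookup table _CATEGORY_OF of Source B
def pvCategoryOf : PySem.Dict String Int :=
  PySem.Dict.mk
  [("id",0),("vacatureid",0),("jobid",0),("requisitionid",0),("externalid",0),
   ("title",1),("functietitel",1),("name",1),("jobtitle",1),("vacaturetitel",1),
   ("status",2),("staat",2),
   ("location",3),("locatie",3),("city",3),("stad",3),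
   ("description",4),("omschrijving",4),("jobdescription",4)]

def is_vacature_dict_py_alt (d : List (String × String)) : Bool :=
  let found : PySem.Set Int := d.foldl (fun found kv =>
      match PySem.Dict.get? pvCategoryOf (pvNormKey kv.1) with
      | some i => PySem.Set.add found i
      | none => found) PySem.Set.empty
  decide (PySem.Set.len found ≥ 2)

-- ===== PRECONDITION & SPEC =====
def Spec_is_vacature_dict_py (d : List (String × String)) (out : Bool) : Prop := out = is_vacature_dict_py_alt d
instance (d : List (String × String)) (out : Bool) : Decidable (Spec_is_vacature_dict_py d out) := by unfold Spec_is_vacature_dict_py; infer_instance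

-- ===== CLAIM (what is proved, stated in full; the proofs are below) =====
def Claim_equal_is_vacature_dict_py : Prop := ∀ (d : List (String × String)), Dom_is_vacature_dict_py d → Spec_is_vacature_dict_py d (is_vacature_dict_py d)

-- ===== LEMMAS AND PROOFS =====

-- the five keyword categories, by their index in Source B's table
def pvKw : Int → List String
  | 0 => ["id", "vacatureid", "jobid", "requisitionid", "externalid"]
  | 1 => ["title", "functietitel", "name", "jobtitle", "vacaturetitel"]
  | 2 => ["status", "staat"]
  | 3 => ["location", "locatie", "city", "stad"]
  | 4 => ["description", "omschrijving", "jobdescription"]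
  | _ => []

def pvHas (d : List (String × String)) (i : Int) : Bool :=
  d.any (fun kv => decide (pvNormKey kv.1 ∈ pvKw i))

def pvCatList (d : List (String × String)) : List Int :=
  List.filter (pvHas d) [0, 1, 2, 3, 4]

theorem table_spec (k : String) : PySem.Dict.get? pvCategoryOf k =
    (if k ∈ pvKw 0 then some 0 else if k ∈ pvKw 1 then some 1 else if k ∈ pvKw 2 then some 2
     else if k ∈ pvKw 3 then some 3 else if k ∈ pvKw 4 then some 4 else none) := by
  by_cases h0 : k ∈ pvKw 0
  · simp only [pvKw, List.mem_cons, List.not_mem_nil, or_false] at h0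
    rcases h0 with h|h|h|h|h <;> subst h <;> decide
  by_cases h1 : k ∈ pvKw 1
  · simp only [pvKw, List.mem_cons, List.not_mem_nil, or_false] at h1
    rcases h1 with h|h|h|h|h <;> subst h <;> decide
  by_cases h2 : k ∈ pvKw 2
  · simp only [pvKw, List.mem_cons, List.not_mem_nil, or_false] at h2
    rcases h2 with h|h <;> subst h <;> decide
  by_cases h3 : k ∈ pvKw 3
  · simp only [pvKw, List.mem_cons, List.not_mem_nil, or_false] at h3
    rcases h3 with h|h|h|h <;> subst h <;> decide
  by_cases h4 : k ∈ pvKw 4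
  · simp only [pvKw, List.mem_cons, List.not_mem_nil, or_false] at h4
    rcases h4 with h|h|h <;> subst h <;> decide
  · rw [if_neg h0, if_neg h1, if_neg h2, if_neg h3, if_neg h4]
    simp only [pvKw, List.mem_cons, List.not_mem_nil, or_false, not_or] at h0 h1 h2 h3 h4
    obtain ⟨a1,a2,a3,a4,a5⟩ := h0
    obtain ⟨b1,b2,b3,b4,b5⟩ := h1
    obtain ⟨c1,c2⟩ := h2
    obtain ⟨e1,e2,e3,e4⟩ := h3
    obtain ⟨f1,f2,f3⟩ := h4
    simp only [pvCategoryOf, PySem.Dict.get?_mk_cons, beq_iff_eq,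
      if_neg (Ne.symm a1), if_neg (Ne.symm a2), if_neg (Ne.symm a3), if_neg (Ne.symm a4), if_neg (Ne.symm a5),
      if_neg (Ne.symm b1), if_neg (Ne.symm b2), if_neg (Ne.symm b3), if_neg (Ne.symm b4), if_neg (Ne.symm b5),
      if_neg (Ne.symm c1), if_neg (Ne.symm c2),
      if_neg (Ne.symm e1), if_neg (Ne.symm e2), if_neg (Ne.symm e3), if_neg (Ne.symm e4),
      if_neg (Ne.symm f1), if_neg (Ne.symm f2), if_neg (Ne.symm f3)]
    rfl

theorem pvKw_disj (k : String) (i j : Int) (hi : i = 0 ∨ i = 1 ∨ i = 2 ∨ i = 3 ∨ i = 4)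
    (hj : j = 0 ∨ j = 1 ∨ j = 2 ∨ j = 3 ∨ j = 4) (hik : k ∈ pvKw i) (hjk : k ∈ pvKw j) : i = j := by
  rcases hi with rfl|rfl|rfl|rfl|rfl <;> rcases hj with rfl|rfl|rfl|rfl|rfl <;>
    first
    | rfl
    | (simp only [pvKw, List.mem_cons, List.not_mem_nil, or_false] at hik hjk
       rcases hik with rfl|rfl|rfl|rfl|rfl <;> revert hjk <;> decide)

theorem table_some_iff (k : String) (i : Int) : PySem.Dict.get? pvCategoryOf k = some i ↔
    ((i = 0 ∨ i = 1 ∨ i = 2 ∨ i = 3 ∨ i = 4) ∧ k ∈ pvKw i) := by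
  rw [table_spec]
  split_ifs with h0 h1 h2 h3 h4
  · constructor
    · intro h; injection h with h; exact ⟨Or.inl h.symm, h ▸ h0⟩
    · rintro ⟨hor, hk⟩
      have h' : i = 0 := pvKw_disj k i 0 hor (by norm_num) hk h0
      subst h'; rfl
  · constructor
    · intro h; injection h with h; exact ⟨Or.inr (Or.inl h.symm), h ▸ h1⟩
    · rintro ⟨hor, hk⟩
      have h' : i = 1 := pvKw_disj k i 1 hor (by norm_num) hk h1
      subst h'; rfl
  · constructor
    · intro h; injection h with h; exact ⟨Or.inr (Or.inr (Or.inl h.symm)), h ▸ h2⟩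
    · rintro ⟨hor, hk⟩
      have h' : i = 2 := pvKw_disj k i 2 hor (by norm_num) hk h2
      subst h'; rfl
  · constructor
    · intro h; injection h with h; exact ⟨Or.inr (Or.inr (Or.inr (Or.inl h.symm))), h ▸ h3⟩
    · rintro ⟨hor, hk⟩
      have h' : i = 3 := pvKw_disj k i 3 hor (by norm_num) hk h3
      subst h'; rfl
  · constructor
    · intro h; injection h with h; exact ⟨Or.inr (Or.inr (Or.inr (Or.inr h.symm))), h ▸ h4⟩
    · rintro ⟨hor, hk⟩
      have h' : i = 4 := pvKw_disj k i 4 hor (by norm_num) hk h4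
      subst h'; rfl
  · constructor
    · intro h; exact absurd h (by simp)
    · rintro ⟨hor, hk⟩
      rcases hor with h'|h'|h'|h'|h' <;> subst h' <;> exact absurd hk (by assumption)

theorem inter_bool (l : List String) (S : List String) :
    (!(PySem.Set.inter (PySem.Set.ofList l) S).isEmpty) = l.any (fun x => decide (x ∈ S)) := by
  rcases h : l.any (fun x => decide (x ∈ S)) with _ | _
  · simp only [List.any_eq_false, decide_eq_true_eq] at h
    have : PySem.Set.inter (PySem.Set.ofList l) S = [] := by
      rw [List.eq_nil_iff_forall_not_mem]
      intro x hx
      rw [PySem.Set.mem_inter, PySem.Set.mem_ofList] at hx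
      exact h x hx.1 hx.2
    simp [this]
  · simp only [List.any_eq_true, decide_eq_true_eq] at h
    obtain ⟨x, hx, hxS⟩ := h
    have : x ∈ PySem.Set.inter (PySem.Set.ofList l) S := by
      rw [PySem.Set.mem_inter, PySem.Set.mem_ofList]; exact ⟨hx, hxS⟩
    rcases he : (PySem.Set.inter (PySem.Set.ofList l) S).isEmpty with _|_
    · rfl
    · rw [List.isEmpty_iff] at he; rw [he] at this; exact absurd this (List.not_mem_nil)

def pvFold (d : List (String × String)) (s : PySem.Set Int) : PySem.Set Int :=
  d.foldl (fun found kv =>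
      match PySem.Dict.get? pvCategoryOf (pvNormKey kv.1) with
      | some i => PySem.Set.add found i
      | none => found) s

theorem mem_pvFold (d : List (String × String)) (s : PySem.Set Int) (i : Int) :
    i ∈ pvFold d s ↔ i ∈ s ∨ ∃ kv ∈ d, PySem.Dict.get? pvCategoryOf (pvNormKey kv.1) = some i := by
  induction d generalizing s with
  | nil => simp [pvFold]
  | cons kv d ih =>
    simp only [pvFold, List.foldl_cons] at *
    rw [ih]
    rcases h : PySem.Dict.get? pvCategoryOf (pvNormKey kv.1) with _ | j
    · simp only [List.mem_cons]
      constructor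
      · rintro (hs | ⟨kv', h1, h2⟩)
        · exact Or.inl hs
        · exact Or.inr ⟨kv', Or.inr h1, h2⟩
      · rintro (hs | ⟨kv', (rfl | h1), h2⟩)
        · exact Or.inl hs
        · rw [h] at h2; exact absurd h2 (by simp)
        · exact Or.inr ⟨kv', h1, h2⟩
    · rw [PySem.Set.mem_add]
      simp only [List.mem_cons]
      constructor
      · rintro ((hs | rfl) | ⟨kv', h1, h2⟩)
        · exact Or.inl hs
        · exact Or.inr ⟨kv, Or.inl rfl, h⟩
        · exact Or.inr ⟨kv', Or.inr h1, h2⟩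
      · rintro (hs | ⟨kv', (rfl | h1), h2⟩)
        · exact Or.inl (Or.inl hs)
        · rw [h] at h2; injection h2 with h2; exact Or.inl (Or.inr h2.symm)
        · exact Or.inr ⟨kv', h1, h2⟩

theorem nodup_pvFold (d : List (String × String)) (s : PySem.Set Int) (hs : s.Nodup) :
    (pvFold d s).Nodup := by
  induction d generalizing s with
  | nil => exact hs
  | cons kv d ih =>
    simp only [pvFold, List.foldl_cons] at *
    cases h : PySem.Dict.get? pvCategoryOf (pvNormKey kv.1) with
    | none => exact ih s hs
    | some j => exact ih _ (PySem.Set.nodup_add s j hs)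

theorem mem_catList (d : List (String × String)) (i : Int) :
    i ∈ pvCatList d ↔ (i = 0 ∨ i = 1 ∨ i = 2 ∨ i = 3 ∨ i = 4) ∧ pvHas d i = true := by
  simp only [pvCatList, List.mem_filter, List.mem_cons, List.not_mem_nil, or_false]

theorem has_iff (d : List (String × String)) (i : Int) :
    pvHas d i = true ↔ ∃ kv ∈ d, pvNormKey kv.1 ∈ pvKw i := by
  simp [pvHas]

theorem nodup_catList (d : List (String × String)) : (pvCatList d).Nodup :=
  List.Nodup.filter _ (by decide)

theorem len_found_eq (d : List (String × String)) :
    (pvFold d PySem.Set.empty).length = (pvCatList d).length := by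
  rw [← List.toFinset_card_of_nodup (nodup_pvFold d PySem.Set.empty List.nodup_nil),
      ← List.toFinset_card_of_nodup (nodup_catList d)]
  congr 1
  apply Finset.ext
  intro i
  simp only [List.mem_toFinset]
  rw [mem_pvFold, mem_catList, has_iff]
  constructor
  · rintro (hs | ⟨kv, h1, h2⟩)
    · exact absurd hs (List.not_mem_nil)
    · rw [table_some_iff] at h2
      exact ⟨h2.1, ⟨kv, h1, h2.2⟩⟩
  · rintro ⟨hor, kv, h1, h2⟩
    exact Or.inr ⟨kv, h1, (table_some_iff _ _).2 ⟨hor, h2⟩⟩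

theorem a_eq (d : List (String × String)) :
    is_vacature_dict_py d = decide (2 ≤ (pvCatList d).length) := by
  unfold is_vacature_dict_py
  simp only [inter_bool]
  have e0 : (d.map (fun kv => pvNormKey kv.1)).any (fun x => decide (x ∈ (["id", "vacatureid", "jobid", "requisitionid", "externalid"] : List String))) = pvHas d 0 := by
    simp [pvHas, pvKw, List.any_map, Function.comp_def]
  have e1 : (d.map (fun kv => pvNormKey kv.1)).any (fun x => decide (x ∈ (["title", "functietitel", "name", "jobtitle", "vacaturetitel"] : List String))) = pvHas d 1 := by
    simp [pvHas, pvKw, List.any_map, Function.comp_def]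
  have e2 : (d.map (fun kv => pvNormKey kv.1)).any (fun x => decide (x ∈ (["status", "staat"] : List String))) = pvHas d 2 := by
    simp [pvHas, pvKw, List.any_map, Function.comp_def]
  have e3 : (d.map (fun kv => pvNormKey kv.1)).any (fun x => decide (x ∈ (["location", "locatie", "city", "stad"] : List String))) = pvHas d 3 := by
    simp [pvHas, pvKw, List.any_map, Function.comp_def]
  have e4 : (d.map (fun kv => pvNormKey kv.1)).any (fun x => decide (x ∈ (["description", "omschrijving", "jobdescription"] : List String))) = pvHas d 4 := by
    simp [pvHas, pvKw, List.any_map, Function.comp_def]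
  rw [e0, e1, e2, e3, e4]
  unfold pvCatList
  simp only [List.filter_cons, List.filter_nil]
  generalize pvHas d 0 = b0
  generalize pvHas d 1 = b1
  generalize pvHas d 2 = b2
  generalize pvHas d 3 = b3
  generalize pvHas d 4 = b4
  cases b0 <;> cases b1 <;> cases b2 <;> cases b3 <;> cases b4 <;> decide

theorem b_eq (d : List (String × String)) :
    is_vacature_dict_py_alt d = decide (2 ≤ (pvCatList d).length) := by
  unfold is_vacature_dict_py_alt
  have : (d.foldl (fun found kv =>
      match PySem.Dict.get? pvCategoryOf (pvNormKey kv.1) with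
      | some i => PySem.Set.add found i
      | none => found) PySem.Set.empty) = pvFold d PySem.Set.empty := rfl
  rw [this]
  simp only [PySem.Set.len, len_found_eq]
  rw [Bool.eq_iff_iff]
  simp only [decide_eq_true_eq, ge_iff_le]
  omega

-- ===== VERDICT (by name: the statement is the Claim_ definition above) =====
theorem is_vacature_dict_py_spec : Claim_equal_is_vacature_dict_py := by
  intro d _
  unfold Spec_is_vacature_dict_py
  rw [a_eq, b_eq]
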